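-- pv_equiv track=rewrite | github.com/fatihsengorr/OpportunityScout | src/capability_explorer.py | _repair_truncated_json
-- ===== SOURCE A (Python) =====
-- def _repair_truncated_json(text: str) -> str:
--     """Repair truncated JSON by closing open brackets/braces."""
--     if not text:
--         return ""
--     depth_brace = 0
--     depth_bracket = 0
--     last_safe_pos = 0
--     in_string = False
--     escape_next = False
--
--     for i, ch in enumerate(text):
--         if escape_next:
--             escape_next = False
--             continue
--         if ch == '\\' and in_string:
--             escape_next = True
--             continue
--         if ch == '"' and not escape_next:
--             in_string = not in_string
--             continue
--         if in_string:
--             continue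
--         if ch == '{':
--             depth_brace += 1
--         elif ch == '}':
--             depth_brace -= 1
--             if depth_brace >= 0:
--                 last_safe_pos = i + 1
--         elif ch == '[':
--             depth_bracket += 1
--         elif ch == ']':
--             depth_bracket -= 1
--
--     if depth_brace == 0 and depth_bracket == 0:
--         return text
--
--     repaired = text[:last_safe_pos]
--     # Recount depth at last_safe_pos
--     depth_brace = 0
--     depth_bracket = 0
--     in_string = False
--     escape_next = False
--     for ch in repaired:
--         if escape_next:
--             escape_next = False
--             continue
--         if ch == '\\' and in_string:
--             escape_next = True
--             continue
--         if ch == '"' and not escape_next: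
--             in_string = not in_string
--             continue
--         if in_string:
--             continue
--         if ch == '{':
--             depth_brace += 1
--         elif ch == '}':
--             depth_brace -= 1
--         elif ch == '[':
--             depth_bracket += 1
--         elif ch == ']':
--             depth_bracket -= 1
--
--     repaired += ']' * depth_bracket + '}' * depth_brace
--     return repaired
-- ===== SOURCE B (Python) =====
-- def _repair_truncated_json(text: str) -> str:
--     """Repair truncated JSON by closing open brackets/braces (single pass)."""
--     depth_brace = 0
--     depth_bracket = 0
--     last_safe_pos = 0
--     safe_brace = 0
--     safe_bracket = 0
--     in_string = False
--     escape_next = False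
--     for i, ch in enumerate(text):
--         if escape_next:
--             escape_next = False
--             continue
--         if ch == '\\' and in_string:
--             escape_next = True
--             continue
--         if ch == '"':
--             in_string = not in_string
--             continue
--         if in_string:
--             continue
--         if ch == '{':
--             depth_brace += 1
--         elif ch == '}':
--             depth_brace -= 1
--             if depth_brace >= 0:
--                 last_safe_pos = i + 1
--                 safe_brace, safe_bracket = depth_brace, depth_bracket
--         elif ch == '[':
--             depth_bracket += 1
--         elif ch == ']':
--             depth_bracket -= 1
--     if depth_brace == 0 and depth_bracket == 0:
--         return text
--     return text[:last_safe_pos] + ']' * safe_bracket + '}' * safe_brace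
-- ===== Notes on version B (the rewrite author's own statement) =====
-- stated objective: simpler
-- what changed: B snapshots the (brace,bracket) depths at each update of last_safe_pos during the single scan, so the whole second recount pass over the truncated prefix disappears.
import Mathlib
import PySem

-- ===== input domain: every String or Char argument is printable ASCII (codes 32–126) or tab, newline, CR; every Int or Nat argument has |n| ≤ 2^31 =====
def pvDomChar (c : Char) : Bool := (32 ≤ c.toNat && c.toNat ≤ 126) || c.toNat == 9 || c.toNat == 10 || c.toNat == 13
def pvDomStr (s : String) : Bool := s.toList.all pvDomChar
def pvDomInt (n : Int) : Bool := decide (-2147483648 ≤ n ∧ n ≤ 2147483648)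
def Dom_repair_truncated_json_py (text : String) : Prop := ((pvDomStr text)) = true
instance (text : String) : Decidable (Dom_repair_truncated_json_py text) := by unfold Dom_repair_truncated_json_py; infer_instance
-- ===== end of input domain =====

-- B removes A's second recount pass by snapshotting the depths whenever last_safe_pos is updated (objective: simpler, one pass).

-- ===== PORT A =====
-- first loop of A: walks enumerate(text) keeping depths, string state and last_safe_pos
def aLoop1 : List Char → Nat → Int → Int → Nat → Bool → Bool → Int × Int × Nat
  | [], _, db, dk, ls, _, _ => (db, dk, ls)
  | c :: cs, i, db, dk, ls, instr, esc =>
    if esc then aLoop1 cs (i+1) db dk ls instr false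
    else if c = '\\' ∧ instr = true then aLoop1 cs (i+1) db dk ls instr true
    else if c = '"' ∧ esc = false then aLoop1 cs (i+1) db dk ls (!instr) esc
    else if instr then aLoop1 cs (i+1) db dk ls instr esc
    else if c = '{' then aLoop1 cs (i+1) (db+1) dk ls instr esc
    else if c = '}' then
      (if db - 1 ≥ 0 then aLoop1 cs (i+1) (db-1) dk (i+1) instr esc
       else aLoop1 cs (i+1) (db-1) dk ls instr esc)
    else if c = '[' then aLoop1 cs (i+1) db (dk+1) ls instr esc
    else if c = ']' then aLoop1 cs (i+1) db (dk-1) ls instr esc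
    else aLoop1 cs (i+1) db dk ls instr esc

-- second (recount) loop of A
def aLoop2 : List Char → Int → Int → Bool → Bool → Int × Int
  | [], db, dk, _, _ => (db, dk)
  | c :: cs, db, dk, instr, esc =>
    if esc then aLoop2 cs db dk instr false
    else if c = '\\' ∧ instr = true then aLoop2 cs db dk instr true
    else if c = '"' ∧ esc = false then aLoop2 cs db dk (!instr) esc
    else if instr then aLoop2 cs db dk instr esc
    else if c = '{' then aLoop2 cs (db+1) dk instr esc
    else if c = '}' then aLoop2 cs (db-1) dk instr esc
    else if c = '[' then aLoop2 cs db (dk+1) instr esc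
    else if c = ']' then aLoop2 cs db (dk-1) instr esc
    else aLoop2 cs db dk instr esc

-- port notes: text[:last_safe_pos] is List.take (last_safe_pos is a Nat ≤ length, exact for Python's slice);
-- ']' * n is List.replicate n.toNat (Python returns '' for n ≤ 0, matching toNat's clamp).
def repair_truncated_json_py (text : String) : String :=
  let t := text.toList
  if t = [] then ""
  else
    let r := aLoop1 t 0 0 0 0 false false
    if r.1 = 0 ∧ r.2.1 = 0 then text
    else
      let repaired := t.take r.2.2
      let r2 := aLoop2 repaired 0 0 false false
      String.ofList (repaired ++ List.replicate r2.2.toNat ']' ++ List.replicate r2.1.toNat '}')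

-- ===== PORT B =====
-- B's single loop: state additionally carries the depths snapshot (sb, sk) taken at last_safe_pos
def bLoop : List Char → Nat → Int → Int → Nat → Int → Int → Bool → Bool → Int × Int × Nat × Int × Int
  | [], _, db, dk, ls, sb, sk, _, _ => (db, dk, ls, sb, sk)
  | c :: cs, i, db, dk, ls, sb, sk, instr, esc =>
    if esc then bLoop cs (i+1) db dk ls sb sk instr false
    else if c = '\\' ∧ instr = true then bLoop cs (i+1) db dk ls sb sk instr true
    else if c = '"' then bLoop cs (i+1) db dk ls sb sk (!instr) esc
    else if instr then bLoop cs (i+1) db dk ls sb sk instr esc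
    else if c = '{' then bLoop cs (i+1) (db+1) dk ls sb sk instr esc
    else if c = '}' then
      (if db - 1 ≥ 0 then bLoop cs (i+1) (db-1) dk (i+1) (db-1) dk instr esc
       else bLoop cs (i+1) (db-1) dk ls sb sk instr esc)
    else if c = '[' then bLoop cs (i+1) db (dk+1) ls sb sk instr esc
    else if c = ']' then bLoop cs (i+1) db (dk-1) ls sb sk instr esc
    else bLoop cs (i+1) db dk ls sb sk instr esc

def repair_truncated_json_py_alt (text : String) : String :=
  let t := text.toList
  let r := bLoop t 0 0 0 0 0 0 false false
  if r.1 = 0 ∧ r.2.1 = 0 then text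
  else String.ofList (t.take r.2.2.1 ++ List.replicate r.2.2.2.2.toNat ']' ++ List.replicate r.2.2.2.1.toNat '}')

-- ===== PRECONDITION & SPEC =====
def Spec_repair_truncated_json_py (text : String) (out : String) : Prop := out = repair_truncated_json_py_alt text
instance (text : String) (out : String) : Decidable (Spec_repair_truncated_json_py text out) := by unfold Spec_repair_truncated_json_py; infer_instance

-- ===== CLAIM (what is proved, stated in full; the proofs are below) =====
def Claim_equal_repair_truncated_json_py : Prop := ∀ (text : String), Dom_repair_truncated_json_py text → Spec_repair_truncated_json_py text (repair_truncated_json_py text)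

-- ===== LEMMAS AND PROOFS =====

-- proof-side helper: the shared per-character transition on (depth_brace, depth_bracket, in_string, escape_next)
def pstep (s : Int × Int × Bool × Bool) (c : Char) : Int × Int × Bool × Bool :=
  if s.2.2.2 then (s.1, s.2.1, s.2.2.1, false)
  else if c = '\\' ∧ s.2.2.1 = true then (s.1, s.2.1, s.2.2.1, true)
  else if c = '"' then (s.1, s.2.1, !s.2.2.1, s.2.2.2)
  else if s.2.2.1 then s
  else if c = '{' then (s.1 + 1, s.2.1, s.2.2.1, s.2.2.2)
  else if c = '}' then (s.1 - 1, s.2.1, s.2.2.1, s.2.2.2)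
  else if c = '[' then (s.1, s.2.1 + 1, s.2.2.1, s.2.2.2)
  else if c = ']' then (s.1, s.2.1 - 1, s.2.2.1, s.2.2.2)
  else s

def prun (cs : List Char) : Int × Int × Bool × Bool := cs.foldl pstep (0, 0, false, false)

lemma prun_append_singleton (pre : List Char) (c : Char) :
    prun (pre ++ [c]) = pstep (prun pre) c := by
  simp [prun, List.foldl_append]

lemma aLoop2_foldl : ∀ (cs : List Char) (db dk : Int) (instr esc : Bool),
    aLoop2 cs db dk instr esc =
      ((List.foldl pstep (db, dk, instr, esc) cs).1, (List.foldl pstep (db, dk, instr, esc) cs).2.1) := by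
  intro cs
  induction cs with
  | nil => intro db dk instr esc; simp [aLoop2]
  | cons c cs IH =>
    intro db dk instr esc
    simp only [aLoop2, List.foldl_cons]
    by_cases h1 : esc = true
    · rw [if_pos h1, show pstep (db, dk, instr, esc) c = (db, dk, instr, false) from by
        simp [pstep, h1]]
      exact IH _ _ _ _
    · have hesc : esc = false := by simpa using h1
      subst hesc
      by_cases h2 : c = '\\' ∧ instr = true
      · rw [if_neg h1, if_pos h2, show pstep (db, dk, instr, false) c = (db, dk, instr, true) from by
          simp [pstep, h2.1, h2.2]]
        exact IH _ _ _ _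
      · by_cases h3 : c = '"'
        · rw [if_neg h1, if_neg h2, if_pos (And.intro h3 rfl),
            show pstep (db, dk, instr, false) c = (db, dk, !instr, false) from by
              simp [pstep, h2, h3]]
          exact IH _ _ _ _
        · by_cases h4 : instr = true
          · have hbs : ¬ c = '\\' := fun hc => h2 (And.intro hc h4)
            rw [if_neg h1, if_neg h2, if_neg (by simp [h3]), if_pos h4,
              show pstep (db, dk, instr, false) c = (db, dk, instr, false) from by
                simp [pstep, hbs, h3, h4]]
            exact IH _ _ _ _
          · have hin : instr = false := by simpa using h4
            subst hin
            by_cases h5 : c = '{'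
            · rw [if_neg h1, if_neg h2, if_neg (by simp [h3]), if_neg h4,
                if_pos h5, show pstep (db, dk, false, false) c = (db + 1, dk, false, false) from by
                  simp [pstep, h2, h3, h5]]
              exact IH _ _ _ _
            · by_cases h6 : c = '}'
              · rw [if_neg h1, if_neg h2, if_neg (by simp [h3]), if_neg h4, if_neg h5,
                  if_pos h6, show pstep (db, dk, false, false) c = (db - 1, dk, false, false) from by
                    simp [pstep, h2, h3, h5, h6]]
                exact IH _ _ _ _
              · by_cases h7 : c = '['
                · rw [if_neg h1, if_neg h2, if_neg (by simp [h3]), if_neg h4, if_neg h5, if_neg h6,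
                    if_pos h7, show pstep (db, dk, false, false) c = (db, dk + 1, false, false) from by
                      simp [pstep, h2, h3, h5, h6, h7]]
                  exact IH _ _ _ _
                · by_cases h8 : c = ']'
                  · rw [if_neg h1, if_neg h2, if_neg (by simp [h3]), if_neg h4, if_neg h5, if_neg h6,
                      if_neg h7, if_pos h8,
                      show pstep (db, dk, false, false) c = (db, dk - 1, false, false) from by
                        simp [pstep, h2, h3, h5, h6, h7, h8]]
                    exact IH _ _ _ _
                  · rw [if_neg h1, if_neg h2, if_neg (by simp [h3]), if_neg h4, if_neg h5, if_neg h6,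
                      if_neg h7, if_neg h8,
                      show pstep (db, dk, false, false) c = (db, dk, false, false) from by
                        simp [pstep, h2, h3, h5, h6, h7, h8]]
                    exact IH _ _ _ _

-- main invariant: B's single loop computes A's first loop plus the recount of text[:last_safe_pos]
lemma main_inv : ∀ (cs : List Char), ∀ (pre : List Char) (db dk : Int) (ls : Nat) (sb sk : Int) (instr esc : Bool),
    prun pre = (db, dk, instr, esc) →
    ls ≤ pre.length →
    (prun (pre.take ls)).1 = sb →
    (prun (pre.take ls)).2.1 = sk →
    bLoop cs pre.length db dk ls sb sk instr esc =
      ((aLoop1 cs pre.length db dk ls instr esc).1,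
       (aLoop1 cs pre.length db dk ls instr esc).2.1,
       (aLoop1 cs pre.length db dk ls instr esc).2.2,
       (prun ((pre ++ cs).take (aLoop1 cs pre.length db dk ls instr esc).2.2)).1,
       (prun ((pre ++ cs).take (aLoop1 cs pre.length db dk ls instr esc).2.2)).2.1) ∧
    (aLoop1 cs pre.length db dk ls instr esc).2.2 ≤ (pre ++ cs).length := by
  intro cs
  induction cs with
  | nil =>
    intro pre db dk ls sb sk instr esc hp hls hsb hsk
    subst hsb; subst hsk
    simp [bLoop, aLoop1, hls]
  | cons c cs IH =>
    intro pre db dk ls sb sk instr esc hp hls hsb hsk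
    have hlen : (pre ++ [c]).length = pre.length + 1 := by simp
    have hta : pre ++ (c :: cs) = (pre ++ [c]) ++ cs := by simp
    have key : ∀ (db' dk' : Int) (ls' : Nat) (sb' sk' : Int) (instr' esc' : Bool),
        prun (pre ++ [c]) = (db', dk', instr', esc') →
        ls' ≤ (pre ++ [c]).length →
        (prun ((pre ++ [c]).take ls')).1 = sb' →
        (prun ((pre ++ [c]).take ls')).2.1 = sk' →
        bLoop cs (pre.length + 1) db' dk' ls' sb' sk' instr' esc' =
          ((aLoop1 cs (pre.length + 1) db' dk' ls' instr' esc').1,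
           (aLoop1 cs (pre.length + 1) db' dk' ls' instr' esc').2.1,
           (aLoop1 cs (pre.length + 1) db' dk' ls' instr' esc').2.2,
           (prun (((pre ++ [c]) ++ cs).take (aLoop1 cs (pre.length + 1) db' dk' ls' instr' esc').2.2)).1,
           (prun (((pre ++ [c]) ++ cs).take (aLoop1 cs (pre.length + 1) db' dk' ls' instr' esc').2.2)).2.1) ∧
        (aLoop1 cs (pre.length + 1) db' dk' ls' instr' esc').2.2 ≤ ((pre ++ [c]) ++ cs).length := by
      intro db' dk' ls' sb' sk' instr' esc' h1 h2 h3 h4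
      have h := IH (pre ++ [c]) db' dk' ls' sb' sk' instr' esc' h1 h2 h3 h4
      rwa [hlen] at h
    have hls' : ls ≤ (pre ++ [c]).length := by simp; omega
    have htk : (pre ++ [c]).take ls = pre.take ls := List.take_append_of_le_length hls
    have htkfull : (pre ++ [c]).take (pre.length + 1) = pre ++ [c] := by
      rw [← hlen]; exact List.take_length
    rw [hta]
    simp only [bLoop, aLoop1]
    by_cases h1 : esc = true
    · simp only [if_pos h1]
      exact key db dk ls sb sk instr false
        (by rw [prun_append_singleton, hp]; simp [pstep, h1]) hls'
        (by rw [htk]; exact hsb) (by rw [htk]; exact hsk)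
    · have hesc : esc = false := by simpa using h1
      subst hesc
      by_cases h2 : c = '\\' ∧ instr = true
      · simp only [if_neg h1, if_pos h2]
        exact key db dk ls sb sk instr true
          (by rw [prun_append_singleton, hp]; simp [pstep, h2.1, h2.2]) hls'
          (by rw [htk]; exact hsb) (by rw [htk]; exact hsk)
      · by_cases h3 : c = '"'
        · simp only [if_neg h1, if_neg h2, if_pos h3,
            if_pos (show c = '"' ∧ True from And.intro h3 trivial)]
          exact key db dk ls sb sk (!instr) false
            (by rw [prun_append_singleton, hp]; simp [pstep, h2, h3]) hls'
            (by rw [htk]; exact hsb) (by rw [htk]; exact hsk)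
        · have hq : ¬ (c = '"' ∧ True) := by simp [h3]
          by_cases h4 : instr = true
          · have hbs : ¬ c = '\\' := fun hc => h2 (And.intro hc h4)
            simp only [if_neg h1, if_neg h2, if_neg h3, if_neg hq, if_pos h4]
            exact key db dk ls sb sk instr false
              (by rw [prun_append_singleton, hp]; simp [pstep, hbs, h3, h4]) hls'
              (by rw [htk]; exact hsb) (by rw [htk]; exact hsk)
          · have hin : instr = false := by simpa using h4
            subst hin
            by_cases h5 : c = '{'
            · simp only [if_neg h1, if_neg h2, if_neg h3, if_neg hq, if_neg h4, if_pos h5]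
              exact key (db + 1) dk ls sb sk false false
                (by rw [prun_append_singleton, hp]; simp [pstep, h3, h5]) hls'
                (by rw [htk]; exact hsb) (by rw [htk]; exact hsk)
            · by_cases h6 : c = '}'
              · have hps : pstep (db, dk, false, false) c = (db - 1, dk, false, false) := by
                  simp [pstep, h3, h5, h6]
                simp only [if_neg h1, if_neg h2, if_neg h3, if_neg hq, if_neg h4, if_neg h5,
                  if_pos h6]
                by_cases h7 : db - 1 ≥ 0
                · simp only [if_pos h7]
                  exact key (db - 1) dk (pre.length + 1) (db - 1) dk false false
                    (by rw [prun_append_singleton, hp, hps]) (le_of_eq hlen.symm)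
                    (by rw [htkfull, prun_append_singleton, hp, hps])
                    (by rw [htkfull, prun_append_singleton, hp, hps])
                · simp only [if_neg h7]
                  exact key (db - 1) dk ls sb sk false false
                    (by rw [prun_append_singleton, hp, hps]) hls'
                    (by rw [htk]; exact hsb) (by rw [htk]; exact hsk)
              · by_cases h7 : c = '['
                · simp only [if_neg h1, if_neg h2, if_neg h3, if_neg hq, if_neg h4, if_neg h5,
                    if_neg h6, if_pos h7]
                  exact key db (dk + 1) ls sb sk false false
                    (by rw [prun_append_singleton, hp]; simp [pstep, h3, h5, h6, h7]) hls'
                    (by rw [htk]; exact hsb) (by rw [htk]; exact hsk)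
                · by_cases h8 : c = ']'
                  · simp only [if_neg h1, if_neg h2, if_neg h3, if_neg hq, if_neg h4, if_neg h5,
                      if_neg h6, if_neg h7, if_pos h8]
                    exact key db (dk - 1) ls sb sk false false
                      (by rw [prun_append_singleton, hp]; simp [pstep, h3, h5, h6, h7, h8]) hls'
                      (by rw [htk]; exact hsb) (by rw [htk]; exact hsk)
                  · simp only [if_neg h1, if_neg h2, if_neg h3, if_neg hq, if_neg h4, if_neg h5,
                      if_neg h6, if_neg h7, if_neg h8]
                    exact key db dk ls sb sk false false
                      (by rw [prun_append_singleton, hp]; simp [pstep, h3, h5, h6, h7, h8]) hls'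
                      (by rw [htk]; exact hsb) (by rw [htk]; exact hsk)

-- ===== VERDICT (by name: the statement is the Claim_ definition above) =====
theorem repair_truncated_json_py_spec : Claim_equal_repair_truncated_json_py := by
  intro text _
  unfold Spec_repair_truncated_json_py repair_truncated_json_py repair_truncated_json_py_alt
  dsimp only
  by_cases h : text.toList = []
  · have htxt : text = "" := String.toList_eq_nil_iff.mp h
    subst htxt
    rw [if_pos h, h]
    simp [bLoop]
  · have hmain := (main_inv text.toList [] 0 0 0 0 0 false false rfl (le_refl 0) rfl rfl).1
    simp only [List.length_nil, List.nil_append] at hmain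
    rw [if_neg h, hmain, aLoop2_foldl]
    dsimp only
    rw [show (List.foldl pstep (0, 0, false, false)
          (List.take (aLoop1 text.toList 0 0 0 0 false false).2.2 text.toList)) =
        prun (List.take (aLoop1 text.toList 0 0 0 0 false false).2.2 text.toList) from rfl]
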